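-- pv_equiv track=rewrite | github.com/jeanlucshaw/mxtoolbox | read/text.py | mangle_list_duplicates
-- ===== SOURCE A (Python) =====
-- def mangle_list_duplicates(list_):
--     """
--     Add suffix to duplicate strings in list strings
--
--     Parameters
--     ----------
--     list_, : list of str
--         List of names to check for duplicates
--
--     Returns
--     -------
--     list:
--         List of names with duplicates suffixed.
--
--     """
--     # Initialize output and duplicate counter
--     list_new = list_.copy()
--     counts = dict()
--
--     # Loop over list elements
--     for index, name in enumerate(list_):
--         occurences = list_.count(name)
--
--         # Modify if one of duplicate set
--         if occurences > 1:
--             if name in counts.keys():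
--                 counts[name] += 1
--                 list_new[index] += '-%d' % counts[name]
--             else:
--                 counts[name] = 1
--                 list_new[index] = '%s-1' % list_[index]
--
--     return list_new
-- ===== SOURCE B (Python) =====
-- def mangle_list_duplicates(list_):
--     # Group the indices of each name in one pass, then suffix each duplicated
--     # group positionally.
--     positions = {}
--     for index, name in enumerate(list_):
--         positions.setdefault(name, []).append(index)
--     list_new = list_.copy()
--     for name, idxs in positions.items():
--         if len(idxs) > 1:
--             for k, idx in enumerate(idxs, 1):
--                 list_new[idx] = '%s-%d' % (name, k)
--     return list_new
-- ===== Notes on version B (the rewrite author's own statement) =====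
-- stated objective: faster
-- what changed: B groups the indices of each name into a dict of index lists in one pass and then rewrites each duplicated group positionally, instead of A's per-element list_.count scan with running counters.
import Mathlib
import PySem

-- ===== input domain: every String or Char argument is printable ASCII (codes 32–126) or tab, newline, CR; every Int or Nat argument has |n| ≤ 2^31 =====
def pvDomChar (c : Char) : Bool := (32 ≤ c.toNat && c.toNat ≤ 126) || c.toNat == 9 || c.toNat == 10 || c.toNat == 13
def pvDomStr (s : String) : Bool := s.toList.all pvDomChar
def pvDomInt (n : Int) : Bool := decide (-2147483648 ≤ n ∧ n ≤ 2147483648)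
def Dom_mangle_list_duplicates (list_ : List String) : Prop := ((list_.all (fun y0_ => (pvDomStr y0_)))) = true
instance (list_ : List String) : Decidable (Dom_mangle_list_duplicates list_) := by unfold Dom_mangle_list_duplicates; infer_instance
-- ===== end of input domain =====

-- B replaces A's per-element list_.count scan with one grouping pass (name -> index list)
-- followed by positional rewriting of each duplicated group (objective: faster).

-- ===== PORT A =====
-- loop body of A's 'for index, name in enumerate(list_)' (state: (list_new, counts))
def mangleStepA (list_ : List String) (st : List String × PySem.Dict String Int)
    (p : Int × String) : List String × PySem.Dict String Int :=
  let index := p.1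
  let name := p.2
  let occurences := PySem.List.count list_ name
  if occurences > 1 then
    if st.2.contains name then
      let counts := st.2.modify name 0 (· + 1)
      (st.1.set index.toNat
        (PySem.List.pyGetD st.1 index "" ++ ("-" ++ PySem.Int.toStr (counts.getD name 0))), counts)
    else
      (st.1.set index.toNat (PySem.List.pyGetD list_ index "" ++ "-1"), st.2.insert name 1)
  else st

def mangle_list_duplicates (list_ : List String) : List String :=
  ((PySem.List.enumerate list_).foldl (mangleStepA list_) (list_, PySem.Dict.empty)).1

-- ===== PORT B =====
-- body of B's 'for name, idxs in positions.items()' loop (inner loop: enumerate(idxs, 1))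
def mangleGroupB (acc : List String) (item : String × List Int) : List String :=
  if item.2.length > 1 then
    (PySem.List.enumerate item.2 1).foldl
      (fun a q => a.set q.2.toNat (item.1 ++ "-" ++ PySem.Int.toStr q.1)) acc
  else acc

def mangle_list_duplicates_alt (list_ : List String) : List String :=
  let positions := (PySem.List.enumerate list_).foldl
    (fun d p => d.modify p.2 [] (fun v => v ++ [p.1])) PySem.Dict.empty
  positions.items.foldl mangleGroupB list_

-- ===== PRECONDITION & SPEC =====
def Spec_mangle_list_duplicates (list_ : List String) (out : List String) : Prop := out = mangle_list_duplicates_alt list_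
instance (list_ : List String) (out : List String) : Decidable (Spec_mangle_list_duplicates list_ out) := by unfold Spec_mangle_list_duplicates; infer_instance

-- ===== CLAIM (what is proved, stated in full; the proofs are below) =====
def Claim_equal_mangle_list_duplicates : Prop := ∀ (list_ : List String), Dom_mangle_list_duplicates list_ → Spec_mangle_list_duplicates list_ (mangle_list_duplicates list_)

-- ===== LEMMAS AND PROOFS =====

lemma enum_eq {α : Type} (d : α) (l : List α) (s : Int) :
    PySem.List.enumerate l s = (List.range l.length).map (fun j : Nat => (s + (j : Int), l.getD j d)) := by
  induction l generalizing s with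
  | nil => simp [PySem.List.enumerate]
  | cons x t ih =>
    rw [PySem.List.enumerate_cons, ih]
    simp only [List.length_cons, List.range_succ_eq_map, List.map_cons, List.map_map]
    refine congrArg₂ List.cons (by simp) ?_
    apply List.map_congr_left
    intro j hj
    simp only [Function.comp_apply, List.getD_cons_succ, Nat.succ_eq_add_one]
    refine congrArg₂ Prod.mk (by push_cast; ring) rfl

lemma take_eq_map_range {α : Type} (d : α) (l : List α) (m : Nat) (hm : m ≤ l.length) :
    l.take m = (List.range m).map (fun i => l.getD i d) := by
  apply List.ext_getElem
  · simp [hm]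
  · intro i h1 h2
    simp at h1 h2 ⊢
    simp [List.getElem?_eq_getElem (by omega : i < l.length)]

lemma count_eq_countP_range {α : Type} [BEq α] [LawfulBEq α] (d : α) (l : List α) (name : α) :
    l.count name = (List.range l.length).countP (fun j => l.getD j d == name) := by
  have h : l = (List.range l.length).map (fun j => l.getD j d) := by
    simpa using take_eq_map_range d l l.length le_rfl
  conv_lhs => rw [h]
  rw [List.count_eq_countP, List.countP_map]
  rfl

lemma idxOf_filter_range (p : Nat → Bool) (n j : Nat) (hj : j < n) (hp : p j = true) :
    List.idxOf j ((List.range n).filter p) = ((List.range j).filter p).length := by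
  induction n with
  | zero => omega
  | succ m ih =>
    rw [List.range_succ, List.filter_append]
    by_cases h : j < m
    · rw [List.idxOf_append_of_mem (by simp [List.mem_filter, hp, h])]
      exact ih h
    · have hj' : j = m := by omega
      subst hj'
      rw [List.idxOf_append_of_notMem (by simp)]
      simp [hp]

-- set preserves getD elsewhere
lemma getD_set_ne {α : Type} (l : List α) (i j : Nat) (a d : α) (h : i ≠ j) :
    (l.set i a).getD j d = l.getD j d := by
  simp [List.getD_eq_getElem?_getD, List.getElem?_set_ne h]

lemma getD_set_self {α : Type} (l : List α) (i : Nat) (a d : α) (h : i < l.length) :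
    (l.set i a).getD i d = a := by
  simp [List.getD_eq_getElem?_getD, h]

-- the inner group-assignment fold (Nat index list)
lemma inner_fold (name : String) (n : Nat) (js : List Nat) (hnd : js.Nodup)
    (hlt : ∀ x ∈ js, x < n) :
    ∀ acc : List String, acc.length = n →
      ((List.range js.length).foldl
          (fun a k => a.set (js.getD k 0) (name ++ "-" ++ PySem.Int.toStr (1 + (k : Int)))) acc).length = n ∧
      ∀ j, j < n →
        ((List.range js.length).foldl
            (fun a k => a.set (js.getD k 0) (name ++ "-" ++ PySem.Int.toStr (1 + (k : Int)))) acc).getD j ""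
          = if j ∈ js then name ++ "-" ++ PySem.Int.toStr (1 + (List.idxOf j js : Int)) else acc.getD j "" := by
  induction js using List.reverseRecOn with
  | nil => intro acc hl; simp [hl]
  | append_singleton ys y ih =>
    intro acc hl
    have hnd' : ys.Nodup := (List.nodup_append.mp hnd).1
    have hy : y ∉ ys := by
      have h := hnd
      simp [List.nodup_append] at h
      tauto
    have hlt' : ∀ x ∈ ys, x < n := fun x hx => hlt x (by simp [hx])
    rw [List.length_append, List.length_singleton, List.range_succ, List.foldl_append]
    -- body over range ys.length reads (ys ++ [y]).getD k = ys.getD k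
    have hcong : (List.range ys.length).foldl
        (fun a k => a.set ((ys ++ [y]).getD k 0) (name ++ "-" ++ PySem.Int.toStr (1 + (k : Int)))) acc
      = (List.range ys.length).foldl
        (fun a k => a.set (ys.getD k 0) (name ++ "-" ++ PySem.Int.toStr (1 + (k : Int)))) acc := by
      apply PySem.List.foldl_congr_mem
      intro a k hk
      simp at hk
      rw [List.getD_append _ _ _ _ hk]
    rw [hcong]
    obtain ⟨hlen1, hval1⟩ := ih hnd' hlt' acc hl
    set mid := (List.range ys.length).foldl
        (fun a k => a.set (ys.getD k 0) (name ++ "-" ++ PySem.Int.toStr (1 + (k : Int)))) acc with hmid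
    have hgy : (ys ++ [y]).getD ys.length 0 = y := by
      simp [List.getD_eq_getElem?_getD]
    rw [List.foldl_cons, List.foldl_nil, hgy]
    refine ⟨by simp [hlen1], ?_⟩
    intro j hjn
    by_cases hjy : j = y
    · subst hjy
      rw [getD_set_self _ _ _ _ (by rw [hlen1]; exact hlt j (by simp))]
      rw [List.idxOf_append_of_notMem hy]
      simp [hy]
    · rw [getD_set_ne _ _ _ _ _ (Ne.symm hjy), hval1 j hjn]
      by_cases hjm : j ∈ ys
      · simp [hjm, List.idxOf_append_of_mem hjm]
      · have : j ∉ ys ++ [y] := by simp [hjm, hjy]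
        simp [hjm, this]

def pvIdxs (l : List String) (name : String) : List Nat :=
  (List.range l.length).filter (fun j => l.getD j "" == name)


lemma pvIdxs_nodup (l : List String) (name : String) : (pvIdxs l name).Nodup :=
  List.Nodup.filter _ List.nodup_range

lemma pvIdxs_lt (l : List String) (name : String) : ∀ x ∈ pvIdxs l name, x < l.length := by
  intro x hx
  simp [pvIdxs, List.mem_filter] at hx
  exact hx.1

lemma pvIdxs_length (l : List String) (name : String) :
    (pvIdxs l name).length = l.count name := by
  rw [count_eq_countP_range "" l name, pvIdxs, List.countP_eq_length_filter]

lemma pvIdxs_mem (l : List String) (name : String) (j : Nat) (hj : j < l.length) :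
    j ∈ pvIdxs l name ↔ l.getD j "" = name := by
  simp [pvIdxs, List.mem_filter, hj]

-- bridge: mangleGroupB on a mapped Nat index list is the range fold of inner_fold
lemma groupB_bridge (name : String) (jsN : List Nat) (acc : List String) :
    mangleGroupB acc (name, jsN.map Int.ofNat)
      = if jsN.length > 1 then
          (List.range jsN.length).foldl
            (fun a k => a.set (jsN.getD k 0) (name ++ "-" ++ PySem.Int.toStr (1 + (k : Int)))) acc
        else acc := by
  unfold mangleGroupB
  have hlen : (jsN.map Int.ofNat).length = jsN.length := by simp
  rw [hlen]
  by_cases h : jsN.length > 1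
  · rw [if_pos h, if_pos h, enum_eq 0, hlen, List.foldl_map]
    apply PySem.List.foldl_congr_mem
    intro a k hk
    simp only [List.mem_range] at hk
    rw [List.getD_eq_getElem?_getD, List.getElem?_eq_getElem (by simpa using hk)]
    rw [List.getD_eq_getElem?_getD, List.getElem?_eq_getElem hk]
    simp
  · rw [if_neg h, if_neg h]

-- the grouping dict built by B's first pass
def pvPositions (l : List String) : PySem.Dict String (List Int) :=
  (PySem.List.enumerate l).foldl
    (fun d p => d.modify p.2 [] (fun v => v ++ [p.1])) PySem.Dict.empty

lemma positions_as_pairs (l : List String) :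
    pvPositions l = ((List.range l.length).map
        (fun j : Nat => (l.getD j "", ((0:Int) + (j : Int))))).foldl
      (fun d p => d.modify p.1 [] (fun v => v ++ [p.2])) PySem.Dict.empty := by
  unfold pvPositions
  rw [enum_eq "" l 0, List.foldl_map, List.foldl_map]

lemma positions_getD (l : List String) (name : String) :
    (pvPositions l).getD name [] = (pvIdxs l name).map Int.ofNat := by
  rw [positions_as_pairs, PySem.Dict.getD_foldl_modify_append, List.filter_map, List.map_map]
  simp only [PySem.Dict.getD_empty, List.nil_append]
  unfold pvIdxs
  have hp : ((fun p => p.1 == name) ∘ (fun j : Nat => (l.getD j "", ((0:Int) + (j : Int)))))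
      = fun j : Nat => l.getD j "" == name := rfl
  rw [hp]
  apply List.map_congr_left
  intro j _
  show ((0:Int) + (j : Int)) = Int.ofNat j
  simp

lemma positions_keys (l : List String) : (pvPositions l).keys = PySem.Set.ofList l := by
  unfold pvPositions
  rw [PySem.Dict.keys_foldl_modify_key (PySem.List.enumerate l) (fun p => p.2) []
        (fun d p => fun v => v ++ [p.1]) PySem.Dict.empty]
  have : (PySem.List.enumerate l).map (fun p => p.2) = l := by
    rw [enum_eq "" l 0, List.map_map]
    have := take_eq_map_range "" l l.length le_rfl
    simp at this
    conv_rhs => rw [this]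
    rfl
  rw [this]
  rfl

lemma positions_nodup (l : List String) : (pvPositions l).keys.Nodup := by
  unfold pvPositions
  exact PySem.Dict.nodup_keys_foldl_modify_key (PySem.List.enumerate l) (fun p => p.2) []
    (fun d p => fun v => v ++ [p.1]) PySem.Dict.empty PySem.Dict.nodup_keys_empty

lemma positions_items (l : List String) :
    (pvPositions l).items = (PySem.Set.ofList l).map
      (fun name => (name, (pvIdxs l name).map Int.ofNat)) := by
  rw [PySem.Dict.items_eq_map_keys (pvPositions l) (positions_nodup l) [], positions_keys]
  apply List.map_congr_left
  intro name _
  rw [positions_getD]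

-- the value the mangling gives slot j
def pvDupVal (l : List String) (j : Nat) : String :=
  l.getD j "" ++ "-" ++ PySem.Int.toStr (((l.take (j + 1)).count (l.getD j "") : Nat) : Int)

def pvVal (l : List String) (j : Nat) : String :=
  if l.count (l.getD j "") > 1 then pvDupVal l j else l.getD j ""

-- rank of j inside its group = count of its name in l.take (j+1)
lemma rank_eq (l : List String) (name : String) (j : Nat) (hj : j < l.length)
    (hn : l.getD j "" = name) :
    1 + (List.idxOf j (pvIdxs l name) : Int) = ((l.take (j + 1)).count name : Int) := by
  have hpj : (l.getD j "" == name) = true := by simp only [beq_iff_eq]; exact hn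
  have h1 : (l.take (j + 1)).count name
      = (List.range (j + 1)).countP (fun i => l.getD i "" == name) := by
    rw [take_eq_map_range "" l (j + 1) (by omega), List.count_eq_countP, List.countP_map]
    rfl
  rw [pvIdxs, idxOf_filter_range _ _ _ hj hpj, ← List.countP_eq_length_filter, h1,
      List.range_succ, List.countP_append]
  have h2 : List.countP (fun i => l.getD i "" == name) [j] = 1 := by
    simp only [List.countP_cons, List.countP_nil, hpj]
    rfl
  rw [h2]
  push_cast
  ring

lemma outer_fold (l : List String) :
    ∀ (ms : List String) (acc : List String), acc.length = l.length →
      ((ms.map (fun name => (name, (pvIdxs l name).map Int.ofNat))).foldl mangleGroupB acc).length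
          = l.length ∧
      ∀ j, j < l.length →
        ((ms.map (fun name => (name, (pvIdxs l name).map Int.ofNat))).foldl mangleGroupB acc).getD j ""
          = if l.getD j "" ∈ ms ∧ l.count (l.getD j "") > 1 then pvDupVal l j
            else acc.getD j "" := by
  intro ms
  induction ms with
  | nil => intro acc hl; simp [hl]
  | cons m rest ih =>
    intro acc hl
    rw [List.map_cons, List.foldl_cons]
    have hbridge := groupB_bridge m (pvIdxs l m) acc
    by_cases hdup : (pvIdxs l m).length > 1
    · rw [if_pos hdup] at hbridge
      obtain ⟨hlen1, hval1⟩ := inner_fold m l.length (pvIdxs l m) (pvIdxs_nodup l m)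
        (pvIdxs_lt l m) acc hl
      rw [hbridge] at *
      obtain ⟨hlen2, hval2⟩ := ih _ hlen1
      refine ⟨hlen2, ?_⟩
      intro j hjn
      rw [hval2 j hjn]
      have hcm : l.count m > 1 := by rw [← pvIdxs_length]; exact hdup
      by_cases hmem : l.getD j "" ∈ rest ∧ l.count (l.getD j "") > 1
      · rw [if_pos hmem, if_pos ⟨List.mem_cons.mpr (Or.inr hmem.1), hmem.2⟩]
      · rw [if_neg hmem, hval1 j hjn]
        by_cases hjm : j ∈ pvIdxs l m
        · have hname : l.getD j "" = m := (pvIdxs_mem l m j hjn).mp hjm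
          rw [if_pos hjm, if_pos ⟨List.mem_cons.mpr (Or.inl hname), by rw [hname]; exact hcm⟩]
          rw [pvDupVal, hname, ← rank_eq l m j hjn hname]
        · have hname : l.getD j "" ≠ m := fun h => hjm ((pvIdxs_mem l m j hjn).mpr h)
          rw [if_neg hjm, if_neg (by
            intro hcon
            rcases List.mem_cons.mp hcon.1 with h | h
            · exact hname h
            · exact hmem ⟨h, hcon.2⟩)]
    · rw [if_neg hdup] at hbridge
      rw [hbridge]
      obtain ⟨hlen2, hval2⟩ := ih acc hl
      refine ⟨hlen2, ?_⟩
      intro j hjn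
      rw [hval2 j hjn]
      have hcm : ¬ l.count m > 1 := by rw [← pvIdxs_length]; exact hdup
      by_cases hmem : l.getD j "" ∈ rest ∧ l.count (l.getD j "") > 1
      · rw [if_pos hmem, if_pos ⟨List.mem_cons.mpr (Or.inr hmem.1), hmem.2⟩]
      · rw [if_neg hmem, if_neg (by
          intro hcon
          rcases List.mem_cons.mp hcon.1 with h | h
          · exact hcm (h ▸ hcon.2)
          · exact hmem ⟨h, hcon.2⟩)]

lemma alt_eq (l : List String) :
    mangle_list_duplicates_alt l = (List.range l.length).map (pvVal l) := by
  show ((pvPositions l).items.foldl mangleGroupB l) = _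
  rw [positions_items]
  obtain ⟨hlen, hval⟩ := outer_fold l (PySem.Set.ofList l) l rfl
  apply List.ext_getElem
  · simp [hlen]
  · intro j h1 h2
    have hj : j < l.length := by rw [← hlen]; exact h1
    rw [← List.getD_eq_getElem _ "" h1, hval j hj]
    rw [List.getElem_map, List.getElem_range]
    have hmem : l.getD j "" ∈ l := by
      rw [List.getD_eq_getElem _ _ hj]; exact List.getElem_mem _
    unfold pvVal
    by_cases hc : l.count (l.getD j "") > 1
    · rw [if_pos ⟨(PySem.Set.mem_ofList l _).mpr hmem, hc⟩, if_pos hc]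
    · rw [if_neg (fun h => hc h.2), if_neg hc]

-- ===== A side =====
def pvStepMid (totals : PySem.Dict String Int) (st : List String × PySem.Dict String Int)
    (name : String) : List String × PySem.Dict String Int :=
  if totals.getD name 0 > 1 then
    let k := st.2.getD name 0 + 1
    (st.1 ++ [name ++ "-" ++ PySem.Int.toStr k], st.2.insert name k)
  else
    (st.1 ++ [name], st.2)

lemma mangle_getD_append (done' rest : List String) (name : String) :
    PySem.List.pyGetD (done' ++ name :: rest) (done'.length : Int) "" = name := by
  simp [PySem.List.pyGetD_natCast, List.getD_eq_getElem?_getD]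

lemma mangle_dash_one : ∀ s : String, s ++ "-1" = s ++ "-" ++ PySem.Int.toStr (0 + 1) := by
  intro s
  have h : ("-1" : String) = "-" ++ PySem.Int.toStr (0 + 1) := by decide
  rw [h, ← String.append_assoc]

lemma mangle_loop (list_ : List String) (totals : PySem.Dict String Int)
    (htot : ∀ name, totals.getD name 0 = (list_.count name : Int)) :
    ∀ (todo pre done' : List String) (c : PySem.Dict String Int),
    list_ = pre ++ todo → done'.length = pre.length →
    ((PySem.List.enumerate todo (pre.length : Int)).foldl (mangleStepA list_) (done' ++ todo, c)).1
      = (todo.foldl (pvStepMid totals) (done', c)).1 := by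
  intro todo
  induction todo with
  | nil => intro pre done' c _ _; simp
  | cons name rest ih =>
    intro pre done' c hsplit hlen
    rw [PySem.List.enumerate_cons, List.foldl_cons, List.foldl_cons]
    have hcnt : PySem.List.count list_ name = list_.count name := by
      simp [PySem.List.count_eq]
    have hA : mangleStepA list_ (done' ++ name :: rest, c) ((pre.length : Int), name)
        = if (list_.count name : Nat) > 1 then
            (done' ++ (name ++ "-" ++ PySem.Int.toStr (c.getD name 0 + 1)) :: rest,
              c.insert name (c.getD name 0 + 1))
          else (done' ++ name :: rest, c) := by
      unfold mangleStepA
      simp only [hcnt]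
      by_cases h1 : (list_.count name : Nat) > 1
      · simp only [if_pos h1]
        by_cases hc : c.contains name = true
        · simp only [hc]
          have hmod : c.modify name 0 (· + 1) = c.insert name (c.getD name 0 + 1) := by
            simp [PySem.Dict.modify]
          rw [← hlen, mangle_getD_append, hmod, PySem.Dict.getD_insert_self]
          simp [String.append_assoc]
        · simp only [Bool.not_eq_true] at hc
          simp only [hc, Bool.false_eq_true, if_false]
          have h0 : c.getD name 0 = 0 := PySem.Dict.getD_of_not_contains c 0 hc
          have hget : PySem.List.pyGetD list_ (pre.length : Int) "" = name := by
            rw [hsplit]; exact mangle_getD_append pre rest name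
          rw [hget, h0]
          simp [← hlen, mangle_dash_one]
      · simp only [if_neg h1]
    have hB : pvStepMid totals (done', c) name
        = if (list_.count name : Nat) > 1 then
            (done' ++ [name ++ "-" ++ PySem.Int.toStr (c.getD name 0 + 1)],
              c.insert name (c.getD name 0 + 1))
          else (done' ++ [name], c) := by
      unfold pvStepMid
      rw [htot name]
      by_cases h1 : (list_.count name : Nat) > 1
      · rw [if_pos (by exact_mod_cast h1), if_pos h1]
      · rw [if_neg (by exact_mod_cast h1), if_neg h1]
    rw [hA, hB]
    by_cases h1 : (list_.count name : Nat) > 1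
    · simp only [if_pos h1]
      have := ih (pre ++ [name])
        (done' ++ [name ++ "-" ++ PySem.Int.toStr (c.getD name 0 + 1)])
        (c.insert name (c.getD name 0 + 1))
        (by simpa using hsplit) (by simp [hlen])
      simpa [List.append_assoc] using this
    · simp only [if_neg h1]
      have := ih (pre ++ [name]) (done' ++ [name]) c
        (by simpa using hsplit) (by simp [hlen])
      simpa [List.append_assoc] using this

lemma getD_middle (pre rest : List String) (name : String) :
    (pre ++ name :: rest).getD pre.length "" = name := by
  rw [List.getD_eq_getElem?_getD, List.getElem?_append_right le_rfl]
  simp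

lemma take_middle (pre rest : List String) (name : String) :
    (pre ++ name :: rest).take (pre.length + 1) = pre ++ [name] := by
  have h : pre ++ name :: rest = (pre ++ [name]) ++ rest := by simp
  rw [h]
  have h2 : pre.length + 1 = (pre ++ [name]).length := by simp
  rw [h2, List.take_left]

lemma mid_loop (l : List String) (totals : PySem.Dict String Int)
    (htot : ∀ name, totals.getD name 0 = (l.count name : Int)) :
    ∀ (todo pre : List String) (out : List String) (seen : PySem.Dict String Int),
      l = pre ++ todo →
      (∀ name, l.count name > 1 → seen.getD name 0 = (pre.count name : Int)) →
      (todo.foldl (pvStepMid totals) (out, seen)).1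
        = out ++ (List.range todo.length).map (fun t => pvVal l (pre.length + t)) := by
  intro todo
  induction todo with
  | nil => intro pre out seen _ _; simp
  | cons name rest ih =>
    intro pre out seen hsplit hinv
    rw [List.foldl_cons]
    have hname : l.getD pre.length "" = name := by rw [hsplit]; exact getD_middle pre rest name
    have htake : (l.take (pre.length + 1)).count name = pre.count name + 1 := by
      rw [hsplit, take_middle, List.count_append]
      simp
    have hsplit' : l = (pre ++ [name]) ++ rest := by simpa using hsplit
    by_cases h1 : l.count name > 1
    · have hstep : pvStepMid totals (out, seen) name
          = (out ++ [name ++ "-" ++ PySem.Int.toStr (seen.getD name 0 + 1)],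
             seen.insert name (seen.getD name 0 + 1)) := by
        unfold pvStepMid
        rw [htot name, if_pos (by exact_mod_cast h1)]
      rw [hstep]
      have hval : name ++ "-" ++ PySem.Int.toStr (seen.getD name 0 + 1) = pvVal l pre.length := by
        unfold pvVal pvDupVal
        rw [hname, if_pos h1, hinv name h1, htake]
        push_cast
        rfl
      have hinv' : ∀ name', l.count name' > 1 →
          (seen.insert name (seen.getD name 0 + 1)).getD name' 0
            = (((pre ++ [name]).count name' : Nat) : Int) := by
        intro name' h'
        by_cases he : name' = name
        · subst he
          rw [PySem.Dict.getD_insert_self, hinv name' h', List.count_append]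
          push_cast
          simp
        · rw [PySem.Dict.getD_insert_of_ne seen _ _ he, hinv name' h', List.count_append]
          have : List.count name' [name] = 0 := by
            simp [List.count_singleton]
            exact fun h => he h.symm
          rw [this]
          simp
      have := ih (pre ++ [name]) (out ++ [name ++ "-" ++ PySem.Int.toStr (seen.getD name 0 + 1)])
        (seen.insert name (seen.getD name 0 + 1)) hsplit' hinv'
      rw [this, hval, List.append_assoc]
      congr 1
      have hlp : (pre ++ [name]).length = pre.length + 1 := by simp
      rw [hlp, List.length_cons, List.range_succ_eq_map, List.map_cons, List.map_map]
      simp only [Nat.add_zero, List.singleton_append]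
      refine congrArg₂ List.cons rfl ?_
      apply List.map_congr_left
      intro t _
      show pvVal l (pre.length + 1 + t) = pvVal l (pre.length + (t + 1))
      congr 1
      omega
    · have hstep : pvStepMid totals (out, seen) name = (out ++ [name], seen) := by
        unfold pvStepMid
        rw [htot name, if_neg (by exact_mod_cast h1)]
      rw [hstep]
      have hval : name = pvVal l pre.length := by
        unfold pvVal
        rw [hname, if_neg h1]
      have hinv' : ∀ name', l.count name' > 1 →
          seen.getD name' 0 = (((pre ++ [name]).count name' : Nat) : Int) := by
        intro name' h'
        have he : name' ≠ name := fun h => h1 (h ▸ h')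
        rw [hinv name' h', List.count_append]
        have : List.count name' [name] = 0 := by
          simp [List.count_singleton]
          exact fun h => he h.symm
        rw [this]
        simp
      have := ih (pre ++ [name]) (out ++ [name]) seen hsplit' hinv'
      rw [this, List.append_assoc]
      congr 1
      have hlp : (pre ++ [name]).length = pre.length + 1 := by simp
      rw [hlp, List.length_cons, List.range_succ_eq_map, List.map_cons, List.map_map]
      simp only [Nat.add_zero, List.singleton_append]
      refine congrArg₂ List.cons hval ?_
      apply List.map_congr_left
      intro t _
      show pvVal l (pre.length + 1 + t) = pvVal l (pre.length + (t + 1))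
      congr 1
      omega

lemma mangle_eq_alt (l : List String) : mangle_list_duplicates l = mangle_list_duplicates_alt l := by
  have htot : ∀ name, (PySem.Dict.counter l).getD name 0 = (l.count name : Int) := by
    intro name
    exact PySem.Dict.getD_counter l name
  have h1 := mangle_loop l (PySem.Dict.counter l) htot l [] [] PySem.Dict.empty (by simp) (by simp)
  have h2 := mid_loop l (PySem.Dict.counter l) htot l [] [] PySem.Dict.empty (by simp)
    (by intro name _; simp [PySem.Dict.getD_empty])
  rw [alt_eq]
  unfold mangle_list_duplicates
  simp only [List.length_nil, Nat.cast_zero, List.nil_append] at h1 h2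
  rw [h1, h2]
  simp

-- ===== VERDICT (by name: the statement is the Claim_ definition above) =====
theorem mangle_list_duplicates_spec : Claim_equal_mangle_list_duplicates := by
  intro list_ _
  show mangle_list_duplicates list_ = mangle_list_duplicates_alt list_
  exact mangle_eq_alt list_
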